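-- pv_equiv track=rewrite | github.com/Yahya-H-Mohamed/09-10-24-Practice-Questions | run.py | reverse_words
-- ===== SOURCE A (Python) =====
-- def reverse_words(text):
--     words = []
--     current_word = ""
--
--     for letter in text:
--         if letter == " ":
--             if current_word: #If a word has already been built
--                 words.append(current_word[::-1]) # Reverse and add it to the array
--                 current_word = "" # Reset the word back
--             words.append(letter) # and add the empty space
--         else:
--             current_word += letter # Build the current word
--
--      # If there is still a word that has not yet been added
--     if current_word:
--         words.append(current_word[::-1]) # Reverse the last word and add it to the array
--
--     return "".join(words) # Join all parts and return the result
-- ===== SOURCE B (Python) =====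
-- def reverse_words(text):
--     return " ".join(w[::-1] for w in text.split(" "))
-- ===== Notes on version B (the rewrite author's own statement) =====
-- stated objective: faster
-- what changed: B replaces A's character-by-character loop with explicit word-buffer and pieces-list state by a one-liner that splits the text on the single space separator, reverses each segment, and joins the segments back with the same separator (split/join reconstruct all spaces exactly).
import Mathlib
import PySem

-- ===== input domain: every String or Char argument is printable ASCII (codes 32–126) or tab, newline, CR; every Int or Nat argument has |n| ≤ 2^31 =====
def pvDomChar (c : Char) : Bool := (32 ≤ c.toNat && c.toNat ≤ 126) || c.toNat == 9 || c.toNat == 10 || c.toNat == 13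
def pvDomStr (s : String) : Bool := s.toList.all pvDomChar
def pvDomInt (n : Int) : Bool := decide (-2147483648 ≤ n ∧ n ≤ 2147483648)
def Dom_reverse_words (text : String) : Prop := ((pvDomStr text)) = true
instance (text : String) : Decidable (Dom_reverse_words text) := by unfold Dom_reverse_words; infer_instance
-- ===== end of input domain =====

-- B replaces A's character loop (word buffer + pieces list) by split(' ') / reverse each segment / join(' '); same return value, idiomatic decomposition.

-- ===== PORT A =====
-- A's loop state: (words = pieces collected so far, current_word); current_word[::-1] is List.reverse.
def reverse_words (text : String) : String :=
  let st := text.toList.foldl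
    (fun (st : List (List Char) × List Char) letter =>
      if letter = ' ' then
        let st := if st.2 ≠ [] then (st.1 ++ [st.2.reverse], ([] : List Char)) else st
        (st.1 ++ [[letter]], st.2)
      else (st.1, st.2 ++ [letter]))
    ([], [])
  let words := if st.2 ≠ [] then st.1 ++ [st.2.reverse] else st.1
  String.mk (PySem.Chars.join [] words)

-- ===== PORT B =====
def reverse_words_alt (text : String) : String :=
  String.mk (PySem.Chars.join [' ']
    ((PySem.Chars.splitOn text.toList [' ']).map List.reverse))

-- ===== PRECONDITION & SPEC =====
def Spec_reverse_words (text : String) (out : String) : Prop := out = reverse_words_alt text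
instance (text : String) (out : String) : Decidable (Spec_reverse_words text out) := by unfold Spec_reverse_words; infer_instance

-- ===== CLAIM (what is proved, stated in full; the proofs are below) =====
def Claim_equal_reverse_words : Prop := ∀ (text : String), Dom_reverse_words text → Spec_reverse_words text (reverse_words text)

-- ===== LEMMAS AND PROOFS =====

/-- Simple structural split on a single space (proof-side characterisation of `splitOn · [' ']`). -/
def pvSp : List Char → List (List Char)
  | [] => [[]]
  | c :: t =>
    if c = ' ' then [] :: pvSp t
    else match pvSp t with
      | s :: r => (c :: s) :: r
      | [] => [[c]]

theorem pvSp_ne_nil (l : List Char) : pvSp l ≠ [] := by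
  cases l with
  | nil => simp [pvSp]
  | cons c t =>
    simp only [pvSp]
    split_ifs
    · simp
    · cases h : pvSp t <;> simp

/-- Prefix the first segment. -/
def pvConsHead (x : List Char) : List (List Char) → List (List Char)
  | [] => [x]
  | s :: r => (x ++ s) :: r

theorem pvGo_eq (fuel : Nat) : ∀ (l cur : List Char) (accs : List (List Char)),
    l.length < fuel →
    PySem.Chars.splitOn.go [' '] fuel l cur accs = accs.reverse ++ pvConsHead cur.reverse (pvSp l) := by
  induction fuel with
  | zero => intro l cur accs h; omega
  | succ fuel ih =>
    intro l cur accs h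
    cases l with
    | nil =>
      rw [PySem.Chars.splitOn.go]
      · simp [pvSp, pvConsHead]
      · omega
    | cons c t =>
      rw [PySem.Chars.splitOn.go]
      by_cases hc : c = ' '
      · subst hc
        have hpre : [' '].isPrefixOf (' ' :: t) = true := by simp [List.isPrefixOf]
        rw [if_pos hpre]
        have hdrop : List.drop [' '].length (' ' :: t) = t := rfl
        rw [hdrop]
        rw [ih t [] (List.reverse cur :: accs) (by simpa using Nat.lt_of_succ_lt_succ h)]
        cases hsp : pvSp t with
        | nil => exact absurd hsp (pvSp_ne_nil t)
        | cons s r => simp [pvSp, pvConsHead, hsp]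
      · have hpre : [' '].isPrefixOf (c :: t) = false := by
          simp [List.isPrefixOf]
          intro hcc; exact absurd hcc.symm hc
        rw [if_neg (by simp [hpre])]
        rw [ih t (c :: cur) accs (by simpa using Nat.lt_of_succ_lt_succ h)]
        cases hsp : pvSp t with
        | nil => exact absurd hsp (pvSp_ne_nil t)
        | cons s r => simp [pvSp, pvConsHead, hsp, hc]

theorem pvConsHead_nil_sp (l : List Char) : pvConsHead [] (pvSp l) = pvSp l := by
  cases hsp : pvSp l with
  | nil => exact absurd hsp (pvSp_ne_nil l)
  | cons s r => simp [pvConsHead]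

theorem pvSplitOn_eq (l : List Char) : PySem.Chars.splitOn l [' '] = pvSp l := by
  rw [PySem.Chars.splitOn, pvGo_eq (l.length + 1) l [] [] (Nat.lt_succ_self _)]
  simpa using pvConsHead_nil_sp l

/-- "".join is flatten-like: appending one more piece. -/
theorem pvJoin_nil_append (ws : List (List Char)) (x : List Char) :
    PySem.Chars.join [] (ws ++ [x]) = PySem.Chars.join [] ws ++ x := by
  induction ws with
  | nil => simp [PySem.Chars.join_nil, PySem.Chars.join_singleton]
  | cons w ws ih =>
    cases ws with
    | nil => simp [PySem.Chars.join_singleton, PySem.Chars.join_cons_cons]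
    | cons q r =>
      have h0 : ((q :: r : List (List Char)) ++ [x]) = q :: (r ++ [x]) := by simp
      rw [h0] at ih
      have h1 : (w :: q :: r : List (List Char)) ++ [x] = w :: q :: (r ++ [x]) := by simp
      rw [h1, PySem.Chars.join_cons_cons, ih, PySem.Chars.join_cons_cons]
      simp

def pvStep (st : List (List Char) × List Char) (letter : Char) : List (List Char) × List Char :=
  if letter = ' ' then
    let st := if st.2 ≠ [] then (st.1 ++ [st.2.reverse], ([] : List Char)) else st
    (st.1 ++ [[letter]], st.2)
  else (st.1, st.2 ++ [letter])

def pvJ (cur : List Char) (segs : List (List Char)) : List Char :=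
  PySem.Chars.join [' '] ((pvConsHead cur segs).map List.reverse)

def pvFinal (st : List (List Char) × List Char) : List Char :=
  PySem.Chars.join [] (if st.2 ≠ [] then st.1 ++ [st.2.reverse] else st.1)

theorem pvMain (l : List Char) : ∀ (cur : List Char) (words : List (List Char)),
    pvFinal (l.foldl pvStep (words, cur)) = PySem.Chars.join [] words ++ pvJ cur (pvSp l) := by
  induction l with
  | nil =>
    intro cur words
    by_cases hcur : cur = []
    · subst hcur; simp [pvFinal, pvJ, pvSp, pvConsHead, PySem.Chars.join_singleton]
    · simp only [List.foldl_nil, pvFinal, pvJ, pvSp, pvConsHead, hcur,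
        ne_eq, not_false_iff, if_true, List.map, List.append_nil,
        PySem.Chars.join_singleton, pvJoin_nil_append]
  | cons c t ih =>
    intro cur words
    by_cases hc : c = ' '
    · subst hc
      have hms : ∃ m ms, (pvSp t).map List.reverse = m :: ms := by
        cases hsp : pvSp t with
        | nil => exact absurd hsp (pvSp_ne_nil t)
        | cons s r => exact ⟨s.reverse, r.map List.reverse, by simp⟩
      obtain ⟨m, ms, hms⟩ := hms
      have hspc : pvSp (' ' :: t) = [] :: pvSp t := by simp [pvSp]
      have h3 : pvConsHead ([] : List Char) ([] :: pvSp t) = [] :: pvSp t := by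
        simp [pvConsHead]
      by_cases hcur : cur = []
      · subst hcur
        have hstep : pvStep (words, ([] : List Char)) ' ' = (words ++ [[' ']], []) := by
          simp [pvStep]
        rw [List.foldl_cons, hstep, ih [] (words ++ [[' ']])]
        simp only [pvJ, pvConsHead_nil_sp, hspc]
        rw [h3, List.map_cons, List.reverse_nil, hms, PySem.Chars.join_cons_cons,
          pvJoin_nil_append]
        simp
      · have hstep : pvStep (words, cur) ' ' = ((words ++ [cur.reverse]) ++ [[' ']], []) := by
          simp [pvStep, hcur]
        have h4 : pvConsHead cur ([] :: pvSp t) = cur :: pvSp t := by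
          simp [pvConsHead]
        rw [List.foldl_cons, hstep, ih [] ((words ++ [cur.reverse]) ++ [[' ']])]
        simp only [pvJ, pvConsHead_nil_sp, hspc]
        rw [h4, List.map_cons, hms, PySem.Chars.join_cons_cons,
          pvJoin_nil_append, pvJoin_nil_append]
        simp
    · rw [List.foldl_cons]
      have hstep : pvStep (words, cur) c = (words, cur ++ [c]) := by
        simp [pvStep, hc]
      rw [hstep, ih (cur ++ [c]) words]
      cases hsp : pvSp t with
      | nil => exact absurd hsp (pvSp_ne_nil t)
      | cons s r =>
        simp [pvJ, pvSp, hc, hsp, pvConsHead]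

-- ===== VERDICT (by name: the statement is the Claim_ definition above) =====
theorem reverse_words_spec : Claim_equal_reverse_words := by
  intro text _
  unfold Spec_reverse_words
  have hA : reverse_words text = String.mk (pvFinal (text.toList.foldl pvStep ([], []))) := rfl
  have hB : reverse_words_alt text
      = String.mk (PySem.Chars.join [' '] ((pvSp text.toList).map List.reverse)) := by
    rw [reverse_words_alt, pvSplitOn_eq]
  rw [hA, hB]
  congr 1
  calc pvFinal (text.toList.foldl pvStep ([], []))
      = PySem.Chars.join [] [] ++ pvJ [] (pvSp text.toList) := pvMain text.toList [] []
    _ = PySem.Chars.join [' '] ((pvSp text.toList).map List.reverse) := by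
        simp [pvJ, pvConsHead_nil_sp, PySem.Chars.join_nil]
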